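-- pv_equiv track=rewrite | github.com/ParveendThakur/Last-Start-CODING-From-ZERO-Learning-from-Masai | Block-36 Module-201 Timed Contest-05/Record Breaker.py | record_breaker
-- ===== SOURCE A (Python) =====
-- def record_breaker(scores):
--     if not scores:
--         return 0, 0
--
--     max_score = scores[0]
--     min_score = scores[0]
--     max_breaks = 0
--     min_breaks = 0
--
--     for i in range(1, len(scores)):
--         if scores[i] > max_score:
--             max_score = scores[i]
--             max_breaks += 1
--         if scores[i] < min_score:
--             min_score = scores[i]
--             min_breaks += 1
--
--     return max_breaks, min_breaks
-- ===== SOURCE B (Python) =====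
-- def _accumulate(xs, f):
--     out = []
--     for x in xs:
--         out.append(x if not out else f(out[-1], x))
--     return out
--
--
-- def record_breaker(scores):
--     rmax = _accumulate(scores, max)
--     rmin = _accumulate(scores, min)
--     max_breaks = sum(1 for a, b in zip(rmax, rmax[1:]) if b > a)
--     min_breaks = sum(1 for a, b in zip(rmin, rmin[1:]) if b < a)
--     return max_breaks, min_breaks
-- ===== Notes on version B (the rewrite author's own statement) =====
-- stated objective: alternative
-- what changed: Replaces the single stateful loop carrying running max/min and two counters by a table-then-count decomposition: build the running-maximum and running-minimum sequences first, then count breaks as strict changes between adjacent entries of each table.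
import Mathlib
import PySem

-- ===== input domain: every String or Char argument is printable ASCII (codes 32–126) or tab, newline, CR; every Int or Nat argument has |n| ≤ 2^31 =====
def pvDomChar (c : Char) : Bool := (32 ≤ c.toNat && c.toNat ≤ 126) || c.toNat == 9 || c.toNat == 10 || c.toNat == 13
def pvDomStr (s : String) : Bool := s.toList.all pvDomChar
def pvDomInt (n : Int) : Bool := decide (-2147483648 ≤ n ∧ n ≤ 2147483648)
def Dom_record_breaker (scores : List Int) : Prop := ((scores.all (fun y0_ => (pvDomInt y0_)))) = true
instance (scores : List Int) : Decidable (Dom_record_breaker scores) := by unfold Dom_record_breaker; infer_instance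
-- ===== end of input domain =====

-- B replaces A's single stateful loop by building the running-max/min tables first and
-- then counting strict changes between adjacent table entries (alternative decomposition, same cost).

-- ===== PORT A =====
def record_breaker (scores : List Int) : Int × Int :=
  match scores with
  | [] => (0, 0)
  | s0 :: _ =>
    let r := (PySem.List.pyRange 1 (PySem.List.len scores) 1).foldl
      (fun (st : (Int × Int) × Int × Int) i =>
        let x := PySem.List.pyGetD scores i 0
        let st := if x > st.1.1 then ((x, st.1.2), st.2.1 + 1, st.2.2) else st
        let st := if x < st.1.2 then ((st.1.1, x), st.2.1, st.2.2 + 1) else st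
        st) ((s0, s0), 0, 0)
    (r.2.1, r.2.2)

-- ===== PORT B =====
-- out[-1] on a nonempty list is its last element; the 'none' branch is the 'if not out' branch.
def pvAccumulate (xs : List Int) (f : Int → Int → Int) : List Int :=
  xs.foldl (fun out x =>
    out ++ [match out.getLast? with
            | none => x
            | some l => f l x]) []

def record_breaker_alt (scores : List Int) : Int × Int :=
  let rmax := pvAccumulate scores (fun a b => max a b)
  let rmin := pvAccumulate scores (fun a b => min a b)
  let max_breaks := ((rmax.zip (PySem.List.slice rmax (some 1) none)).map
      (fun p => if p.2 > p.1 then (1 : Int) else 0)).sum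
  let min_breaks := ((rmin.zip (PySem.List.slice rmin (some 1) none)).map
      (fun p => if p.2 < p.1 then (1 : Int) else 0)).sum
  (max_breaks, min_breaks)

-- ===== PRECONDITION & SPEC =====
def Spec_record_breaker (scores : List Int) (out : Int × Int) : Prop := out = record_breaker_alt scores
instance (scores : List Int) (out : Int × Int) : Decidable (Spec_record_breaker scores out) := by unfold Spec_record_breaker; infer_instance

-- ===== CLAIM (what is proved, stated in full; the proofs are below) =====
def Claim_equal_record_breaker : Prop := ∀ (scores : List Int), Dom_record_breaker scores → Spec_record_breaker scores (record_breaker scores)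

-- ===== LEMMAS AND PROOFS =====

-- number of times the running max (resp. min), starting at c, is broken along t
def pvCntUp : Int → List Int → Int
  | _, [] => 0
  | c, x :: t => (if x > c then 1 else 0) + pvCntUp (max c x) t

def pvCntDn : Int → List Int → Int
  | _, [] => 0
  | c, x :: t => (if x < c then 1 else 0) + pvCntDn (min c x) t

-- A's loop body as a named function (definitionally the lambda in the port)
def pvStep (st : (Int × Int) × Int × Int) (x : Int) : (Int × Int) × Int × Int :=
  let st := if x > st.1.1 then ((x, st.1.2), st.2.1 + 1, st.2.2) else st
  let st := if x < st.1.2 then ((st.1.1, x), st.2.1, st.2.2 + 1) else st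
  st

theorem pvAcc_aux (f : Int → Int → Int) (t p : List Int) (c : Int) :
    t.foldl (fun out x =>
      out ++ [match out.getLast? with
              | none => x
              | some l => f l x]) (p ++ [c]) = p ++ List.scanl f c t := by
  induction t generalizing p c with
  | nil => simp
  | cons x t ih =>
    simp only [List.foldl_cons, List.getLast?_concat, List.scanl_cons]
    rw [ih (p ++ [c]) (f c x)]
    simp

theorem pvAcc_cons (f : Int → Int → Int) (x : Int) (t : List Int) :
    pvAccumulate (x :: t) f = List.scanl f x t := by
  unfold pvAccumulate
  simpa using pvAcc_aux f t [] x

theorem pairSum_scanl_max (t : List Int) (c : Int) :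
    (((List.scanl (fun a b => max a b) c t).zip
        (List.scanl (fun a b => max a b) c t).tail).map
        (fun p => if p.2 > p.1 then (1 : Int) else 0)).sum = pvCntUp c t := by
  induction t generalizing c with
  | nil => simp [pvCntUp]
  | cons x t ih =>
    rw [List.scanl_cons]
    cases t with
    | nil =>
      by_cases h : x > c
      · simp [pvCntUp, h]
      · simp [pvCntUp, h]
    | cons y t' =>
      rw [List.scanl_cons]
      simp only [List.tail_cons, List.zip_cons_cons, List.map_cons, List.sum_cons]
      have hih := ih (max c x)
      rw [List.scanl_cons] at hih
      simp only [List.tail_cons] at hih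
      rw [hih]
      by_cases h : x > c
      · simp [pvCntUp, h]
      · simp [pvCntUp, h]

theorem pairSum_scanl_min (t : List Int) (c : Int) :
    (((List.scanl (fun a b => min a b) c t).zip
        (List.scanl (fun a b => min a b) c t).tail).map
        (fun p => if p.2 < p.1 then (1 : Int) else 0)).sum = pvCntDn c t := by
  induction t generalizing c with
  | nil => simp [pvCntDn]
  | cons x t ih =>
    rw [List.scanl_cons]
    cases t with
    | nil =>
      by_cases h : x < c
      · simp [pvCntDn, h]
      · simp [pvCntDn, h]
    | cons y t' =>
      rw [List.scanl_cons]
      simp only [List.tail_cons, List.zip_cons_cons, List.map_cons, List.sum_cons]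
      have hih := ih (min c x)
      rw [List.scanl_cons] at hih
      simp only [List.tail_cons] at hih
      rw [hih]
      by_cases h : x < c
      · simp [pvCntDn, h]
      · simp [pvCntDn, h]

theorem stepA_spec (t : List Int) (M m mb nb : Int) :
    t.foldl pvStep ((M, m), mb, nb)
      = ((t.foldl max M, t.foldl min m), mb + pvCntUp M t, nb + pvCntDn m t) := by
  induction t generalizing M m mb nb with
  | nil => simp [pvCntUp, pvCntDn]
  | cons x t ih =>
    simp only [List.foldl_cons]
    by_cases h1 : x > M <;> by_cases h2 : x < m
    · simp only [pvStep, h1, h2, ite_true]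
      rw [ih]
      simp [pvCntUp, pvCntDn, h1, h2, Prod.ext_iff,
            max_eq_right (le_of_lt h1), min_eq_right (le_of_lt h2)]
      try omega
    · simp only [pvStep, h1, h2, ite_true, ite_false]
      rw [ih]
      simp [pvCntUp, pvCntDn, h1, h2, Prod.ext_iff,
            max_eq_right (le_of_lt h1), min_eq_left (not_lt.1 h2)]
      try omega
    · simp only [pvStep, h1, h2, ite_true, ite_false]
      rw [ih]
      simp [pvCntUp, pvCntDn, h1, h2, Prod.ext_iff,
            max_eq_left (not_lt.1 h1), min_eq_right (le_of_lt h2)]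
      try omega
    · simp only [pvStep, h1, h2, ite_false]
      rw [ih]
      simp [pvCntUp, pvCntDn, h1, h2,
            max_eq_left (not_lt.1 h1), min_eq_left (not_lt.1 h2)]
      try omega

-- ===== VERDICT (by name: the statement is the Claim_ definition above) =====
theorem record_breaker_spec : Claim_equal_record_breaker := by
  intro scores _
  unfold Spec_record_breaker
  cases scores with
  | nil => rfl
  | cons s0 t =>
    have hA : record_breaker (s0 :: t)
        = (((PySem.List.pyRange 1 (((s0 :: t).length : Int)) 1).foldl
            (fun st i => pvStep st (PySem.List.pyGetD (s0 :: t) i 0)) ((s0, s0), 0, 0)).2.1,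
           ((PySem.List.pyRange 1 (((s0 :: t).length : Int)) 1).foldl
            (fun st i => pvStep st (PySem.List.pyGetD (s0 :: t) i 0)) ((s0, s0), 0, 0)).2.2) := rfl
    have hB : record_breaker_alt (s0 :: t)
        = ((((List.scanl (fun a b => max a b) s0 t).zip
              (PySem.List.slice (List.scanl (fun a b => max a b) s0 t) (some 1) none)).map
              (fun p => if p.2 > p.1 then (1 : Int) else 0)).sum,
           (((List.scanl (fun a b => min a b) s0 t).zip
              (PySem.List.slice (List.scanl (fun a b => min a b) s0 t) (some 1) none)).map
              (fun p => if p.2 < p.1 then (1 : Int) else 0)).sum) := by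
      unfold record_breaker_alt
      rw [pvAcc_cons, pvAcc_cons]
    rw [hA, hB,
        PySem.List.foldl_pyRange_pyGetD' (s0 :: t) (0 : Int) pvStep ((s0, s0), 0, 0) (show (0:Int) ≤ 1 by norm_num),
        PySem.List.slice_from_one, PySem.List.slice_from_one,
        pairSum_scanl_max, pairSum_scanl_min]
    simp [stepA_spec]
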